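-- pv_equiv track=rewrite | github.com/AM-Campbell/mnmd-anki-sync | src/mnmd_anki_sync/utils/base52.py | decode_base52
-- ===== SOURCE A (Python) =====
-- BASE52_CHARS = "abcdefghijklmnopqrstuvwxyzABCDEFGHIJKLMNOPQRSTUVWXYZ"
--
-- def decode_base52(s: str) -> int:
--     """Convert a base52 string back to a number.
--
--     Args:
--         s: Base52 encoded string
--
--     Returns:
--         Decoded number (Anki note ID)
--
--     Raises:
--         ValueError: If string contains non-alphabetic characters
--
--     Examples:
--         >>> decode_base52('a')
--         0
--         >>> decode_base52('ba')
--         52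
--         >>> decode_base52('bkcQMk')
--         1234567890
--     """
--     if not s.isalpha():
--         raise ValueError(f"Invalid base52 string: {s!r}. Must contain only letters.")
--
--     result = 0
--     for char in s:
--         if char not in BASE52_CHARS:
--             raise ValueError(f"Invalid character {char!r} in base52 string")
--         result = result * 52 + BASE52_CHARS.index(char)
--     return result
-- ===== SOURCE B (Python) =====
-- def decode_base52(s: str) -> int:
--     """Convert a base52 string back to a number (right-to-left positional weighted sum)."""
--     if not s.isalpha():
--         raise ValueError(f"Invalid base52 string: {s!r}. Must contain only letters.")
--     total = 0
--     w = 1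
--     for c in reversed(s):
--         v = ord(c) - 97 if 'a' <= c <= 'z' else ord(c) - 65 + 26
--         total += v * w
--         w *= 52
--     return total
-- ===== Notes on version B (the rewrite author's own statement) =====
-- stated objective: alternative
-- what changed: Horner left-to-right multiply-accumulate with a per-char .index scan of the alphabet string is replaced by a right-to-left positional weighted sum: reversed iteration with an accumulated weight (w *= 52) and ord-arithmetic digit values, no alphabet scan or membership lookup.
import Mathlib
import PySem

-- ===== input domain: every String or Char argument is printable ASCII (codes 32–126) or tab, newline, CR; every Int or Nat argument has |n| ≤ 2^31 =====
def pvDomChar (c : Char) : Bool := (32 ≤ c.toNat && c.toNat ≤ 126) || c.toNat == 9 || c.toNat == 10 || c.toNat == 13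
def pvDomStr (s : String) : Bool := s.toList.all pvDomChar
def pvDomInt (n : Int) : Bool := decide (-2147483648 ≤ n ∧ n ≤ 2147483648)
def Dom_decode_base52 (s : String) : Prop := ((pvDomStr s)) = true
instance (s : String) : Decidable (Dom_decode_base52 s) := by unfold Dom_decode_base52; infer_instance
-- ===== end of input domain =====

-- B replaces A's Horner multiply-accumulate (with a per-char alphabet .index scan) by an
-- right-to-left positional sum (accumulated weight w *= 52, ord-arithmetic digit values).


-- ===== PORT A =====
-- BASE52_CHARS
def pvB52 : List Char := "abcdefghijklmnopqrstuvwxyzABCDEFGHIJKLMNOPQRSTUVWXYZ".toList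

-- literal port of A: isalpha guard (ValueError modelled as 0, excluded by Pre_), then a
-- Horner fold where a char missing from BASE52_CHARS makes the fold fail (ValueError, 0)
def decode_base52 (s : String) : Int :=
  if PySem.Str.strIsalpha s = false then 0   -- raise ValueError
  else
    match s.toList.foldlM
        (fun (r : Int) (c : Char) =>
          match PySem.List.index? pvB52 c with
          | some i => some (r * 52 + (i : Int))
          | none => (none : Option Int))     -- raise ValueError
        (0 : Int) with
    | some r => r
    | none => 0                              -- raise ValueError (unreachable under Pre_)

-- ===== PORT B =====
def pvVal (c : Char) : Int :=
  if 'a' ≤ c ∧ c ≤ 'z' then (c.toNat : Int) - 97 else (c.toNat : Int) - 65 + 26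

def decode_base52_alt (s : String) : Int :=
  if PySem.Str.strIsalpha s = false then 0   -- raise ValueError
  else
    (s.toList.reverse.foldl
      (fun (p : Int × Int) (c : Char) => (p.1 + pvVal c * p.2, p.2 * 52)) (0, 1)).1

-- ===== PRECONDITION & SPEC =====
-- Pre_ excludes exactly the strings on which A raises ValueError: empty strings and strings
-- with a character that is not an ASCII letter (Python's isalpha on the printable-ASCII domain).
def Pre_decode_base52 (s : String) : Prop := PySem.Str.strIsalpha s = true
instance (s : String) : Decidable (Pre_decode_base52 s) := by unfold Pre_decode_base52; infer_instance
def pvWitness_decode_base52 : String := "bkcQMk"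

def Spec_decode_base52 (s : String) (out : Int) : Prop := out = decode_base52_alt s
instance (s : String) (out : Int) : Decidable (Spec_decode_base52 s out) := by unfold Spec_decode_base52; infer_instance

-- ===== CLAIM (what is proved, stated in full; the proofs are below) =====
def Claim_equal_decode_base52 : Prop := ∀ (s : String), Dom_decode_base52 s → Pre_decode_base52 s → Spec_decode_base52 s (decode_base52 s)

-- ===== LEMMAS AND PROOFS =====

-- the common value both loops compute: Σ pvVal c_i * 52^(n-1-i), stated recursively
def pvPowsum : List Char → Int
  | [] => 0
  | c :: cs => pvVal c * 52 ^ cs.length + pvPowsum cs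

theorem pvIdx_lower (c : Char) (h1 : 'a' ≤ c) (h2 : c ≤ 'z') :
    PySem.List.index? pvB52 c = some (c.toNat - 97) := by
  have b1 : 97 ≤ c.toNat := UInt32.le_iff_toNat_le.mp (Char.le_def.mp h1)
  have b2 : c.toNat ≤ 122 := UInt32.le_iff_toNat_le.mp (Char.le_def.mp h2)
  have key : ∀ n, n < 26 → PySem.List.index? pvB52 (Char.ofNat (97 + n)) = some n := by decide
  have h := key (c.toNat - 97) (by omega)
  rwa [show 97 + (c.toNat - 97) = c.toNat by omega, Char.ofNat_toNat] at h

theorem pvIdx_upper (c : Char) (h1 : 'A' ≤ c) (h2 : c ≤ 'Z') :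
    PySem.List.index? pvB52 c = some (c.toNat - 65 + 26) := by
  have b1 : 65 ≤ c.toNat := UInt32.le_iff_toNat_le.mp (Char.le_def.mp h1)
  have b2 : c.toNat ≤ 90 := UInt32.le_iff_toNat_le.mp (Char.le_def.mp h2)
  have key : ∀ n, n < 26 → PySem.List.index? pvB52 (Char.ofNat (65 + n)) = some (n + 26) := by decide
  have h := key (c.toNat - 65) (by omega)
  rwa [show 65 + (c.toNat - 65) = c.toNat by omega, Char.ofNat_toNat] at h

theorem pvIdx_val (c : Char) (h : PySem.Chars.isalpha c = true) :
    ∃ k : Nat, PySem.List.index? pvB52 c = some k ∧ (k : Int) = pvVal c := by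
  simp only [PySem.Chars.isalpha, PySem.Chars.isupper, PySem.Chars.islower, Bool.or_eq_true,
    Bool.and_eq_true, decide_eq_true_eq] at h
  rcases h with ⟨h1, h2⟩ | ⟨h1, h2⟩
  · have b1 : 65 ≤ c.toNat := UInt32.le_iff_toNat_le.mp (Char.le_def.mp h1)
    have b2 : c.toNat ≤ 90 := UInt32.le_iff_toNat_le.mp (Char.le_def.mp h2)
    refine ⟨c.toNat - 65 + 26, pvIdx_upper c h1 h2, ?_⟩
    have hnl : ¬ ('a' ≤ c ∧ c ≤ 'z') := by
      rintro ⟨hl, -⟩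
      have h3 : 97 ≤ c.toNat := UInt32.le_iff_toNat_le.mp (Char.le_def.mp hl)
      omega
    simp only [pvVal, if_neg hnl]
    omega
  · have b1 : 97 ≤ c.toNat := UInt32.le_iff_toNat_le.mp (Char.le_def.mp h1)
    refine ⟨c.toNat - 97, pvIdx_lower c h1 h2, ?_⟩
    simp only [pvVal, if_pos (show 'a' ≤ c ∧ c ≤ 'z' from ⟨h1, h2⟩)]
    omega

-- A's Horner fold, characterised
theorem pvFoldA (cs : List Char) (hall : ∀ c ∈ cs, PySem.Chars.isalpha c = true) :
    ∀ r : Int,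
      cs.foldlM
        (fun (r : Int) (c : Char) =>
          match PySem.List.index? pvB52 c with
          | some i => some (r * 52 + (i : Int))
          | none => (none : Option Int)) r
      = some (r * 52 ^ cs.length + pvPowsum cs) := by
  induction cs with
  | nil => intro r; simp [pvPowsum]
  | cons c cs ih =>
    intro r
    obtain ⟨k, hk, hkv⟩ := pvIdx_val c (hall c (List.mem_cons_self))
    have ih' := ih (fun d hd => hall d (List.mem_cons_of_mem _ hd)) (r * 52 + (k : Int))
    simp only [List.foldlM_cons, hk, Option.bind_eq_bind]
    rw [Option.bind_some, ih', hkv]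
    congr 1
    simp only [pvPowsum, List.length_cons]
    ring

-- the right-to-left reading of the same sum: least-significant digit first
def pvRps : List Char → Int
  | [] => 0
  | c :: ds => pvVal c + 52 * pvRps ds

-- B's reversed fold, characterised
theorem pvFoldB (ds : List Char) :
    ∀ (t w : Int),
      ds.foldl (fun (p : Int × Int) (c : Char) => (p.1 + pvVal c * p.2, p.2 * 52)) (t, w)
      = (t + w * pvRps ds, w * 52 ^ ds.length) := by
  induction ds with
  | nil => intro t w; simp [pvRps]
  | cons c ds ih =>
    intro t w
    simp only [List.foldl_cons]
    rw [ih]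
    simp only [pvRps, List.length_cons]
    refine Prod.ext ?_ ?_ <;> simp <;> ring

theorem pvRps_append (ds : List Char) (c : Char) :
    pvRps (ds ++ [c]) = pvRps ds + pvVal c * 52 ^ ds.length := by
  induction ds with
  | nil => simp [pvRps]
  | cons d ds ih =>
    simp only [List.cons_append, pvRps, ih, List.length_cons]
    ring

theorem pvPowsum_eq_rps_reverse (cs : List Char) : pvPowsum cs = pvRps cs.reverse := by
  induction cs with
  | nil => rfl
  | cons c cs ih =>
    simp only [pvPowsum, List.reverse_cons, pvRps_append, ih, List.length_reverse]
    ring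

-- ===== VERDICT (by name: the statement is the Claim_ definition above) =====
theorem decode_base52_spec : Claim_equal_decode_base52 := by
  intro s _ hpre
  unfold Spec_decode_base52 decode_base52 decode_base52_alt
  unfold Pre_decode_base52 at hpre
  rw [hpre]
  simp only [Bool.true_eq_false, if_false]
  have hall : ∀ c ∈ s.toList, PySem.Chars.isalpha c = true := by
    have := hpre
    rw [PySem.Str.strIsalpha_eq] at this
    simp only [PySem.Chars.strIsalpha, Bool.and_eq_true, List.all_eq_true] at this
    exact fun c hc => this.2 c hc
  rw [pvFoldA s.toList hall 0]
  rw [pvFoldB s.toList.reverse 0 1]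
  simp [pvPowsum_eq_rps_reverse]
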